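-- pv_equiv track=rewrite | github.com/DynamicEV21/CrabQuant | crabquant/refinement/context_builder.py | _strip_advanced_functions
-- ===== SOURCE A (Python) =====
-- def _strip_advanced_functions(source: str) -> str:
--     """Strip PARAM_GRID and generate_signals_matrix from strategy source code.
--
--     These are not needed by the refinement loop and their inclusion in examples
--     causes the LLM to generate unnecessarily large strategy code, often exceeding
--     max_tokens and producing truncated/incomplete JSON responses.
--     """
--     lines = source.split('\n')
--     result_lines = []
--     skip_mode = None  # None, 'braces', 'function'
--     brace_depth = 0
--     func_indent = 0
--
--     for line in lines:
--         stripped = line.strip()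
--         leading = len(line) - len(line.lstrip())
--
--         # Skip blank lines during any skip mode
--         if not stripped and skip_mode:
--             continue
--
--         if skip_mode == 'braces':
--             brace_depth += stripped.count('{') - stripped.count('}')
--             if brace_depth <= 0:
--                 skip_mode = None
--                 brace_depth = 0
--             continue
--
--         if skip_mode == 'function':
--             # Stop when we see another top-level definition at the same indent
--             if (stripped.startswith('def ') or stripped.startswith('class ') or
--                     stripped.startswith('PARAM_GRID') or stripped.startswith('DESCRIPTION') or
--                     stripped.startswith('DEFAULT_PARAMS')) and leading <= func_indent:
--                 skip_mode = None
--                 # Don't skip this line — it's the next top-level block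
--                 result_lines.append(line)
--                 continue
--             # Skip everything else (including signature continuations at indent 0)
--             continue
--
--         # Check if this line starts a block we want to skip
--         if stripped.startswith('PARAM_GRID'):
--             if '{' in stripped:
--                 brace_depth = stripped.count('{') - stripped.count('}')
--                 skip_mode = 'braces' if brace_depth > 0 else None
--             continue
--
--         if stripped.startswith('def generate_signals_matrix'):
--             func_indent = leading
--             skip_mode = 'function'
--             continue
--
--         result_lines.append(line)
--
--     return '\n'.join(result_lines).strip()
-- ===== SOURCE B (Python) =====
-- def _strip_advanced_functions(source: str) -> str:
--     """Strip PARAM_GRID and generate_signals_matrix from strategy source code.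
--
--     Index-based rewrite: an outer while loop over the split lines with two inner
--     consuming loops (brace-balance skip, function-body skip) instead of a
--     per-line state machine with skip_mode/brace_depth flags.
--     """
--     lines = source.split('\n')
--     n = len(lines)
--     out = []
--     i = 0
--     while i < n:
--         line = lines[i]
--         stripped = line.strip()
--         if stripped.startswith('PARAM_GRID'):
--             i += 1
--             if '{' in stripped:
--                 depth = stripped.count('{') - stripped.count('}')
--                 while depth > 0 and i < n:
--                     s = lines[i].strip()
--                     if s:
--                         depth += s.count('{') - s.count('}')
--                     i += 1
--             continue
--         if stripped.startswith('def generate_signals_matrix'):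
--             func_indent = len(line) - len(line.lstrip())
--             i += 1
--             while i < n:
--                 nxt = lines[i]
--                 s = nxt.strip()
--                 i += 1
--                 if s and (s.startswith(('def ', 'class ', 'PARAM_GRID', 'DESCRIPTION', 'DEFAULT_PARAMS'))
--                           and len(nxt) - len(nxt.lstrip()) <= func_indent):
--                     out.append(nxt)
--                     break
--             continue
--         out.append(line)
--         i += 1
--     return '\n'.join(out).strip()
-- ===== Notes on version B (the rewrite author's own statement) =====
-- stated objective: alternative
-- what changed: Replaces A's single per-line pass driven by skip_mode/brace_depth state flags with an index-based outer while loop that, on hitting a PARAM_GRID or generate_signals_matrix header, runs a dedicated inner consuming loop (brace-balance skip resp. function-body skip) and then resumes; no mode variable survives across outer iterations.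
import Mathlib
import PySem

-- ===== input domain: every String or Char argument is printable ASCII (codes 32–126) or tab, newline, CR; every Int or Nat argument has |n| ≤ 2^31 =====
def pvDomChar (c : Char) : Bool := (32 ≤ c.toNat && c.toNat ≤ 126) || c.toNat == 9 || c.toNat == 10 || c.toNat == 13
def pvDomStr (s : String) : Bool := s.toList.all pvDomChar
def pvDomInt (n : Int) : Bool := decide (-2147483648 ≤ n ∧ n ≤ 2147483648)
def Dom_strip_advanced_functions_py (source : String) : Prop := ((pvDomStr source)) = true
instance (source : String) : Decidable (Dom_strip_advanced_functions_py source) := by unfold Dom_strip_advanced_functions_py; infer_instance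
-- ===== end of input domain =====

-- B rewrites A's per-line skip_mode/brace_depth state machine as an outer index loop with two
-- inner consuming loops; same return value, objective: alternative decomposition (not faster).

-- ===== PORT A =====
inductive PvSkip | noskip | braces | function
deriving DecidableEq

-- len(line) - len(line.lstrip())
def pvLeading (line : List Char) : Int :=
  (line.length : Int) - ((PySem.Chars.lstrip line).length : Int)

-- stripped.count('{') - stripped.count('}')
def pvBraceDelta (stripped : List Char) : Int :=
  (PySem.Chars.count stripped ['{'] : Int) - (PySem.Chars.count stripped ['}'] : Int)

-- the for-loop of A, as structural recursion over the lines with the loop state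
def pvALoop : PvSkip → Int → Int → List (List Char) → List (List Char)
  | _, _, _, [] => []
  | mode, braceDepth, funcIndent, line :: rest =>
    let stripped := PySem.Chars.strip line
    let leading := pvLeading line
    if stripped = [] ∧ mode ≠ PvSkip.noskip then
      pvALoop mode braceDepth funcIndent rest
    else if mode = PvSkip.braces then
      let d := braceDepth + pvBraceDelta stripped
      if d ≤ 0 then pvALoop PvSkip.noskip 0 funcIndent rest
      else pvALoop PvSkip.braces d funcIndent rest
    else if mode = PvSkip.function then
      if (PySem.Chars.startswith stripped "def ".toList ∨ PySem.Chars.startswith stripped "class ".toList ∨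
          PySem.Chars.startswith stripped "PARAM_GRID".toList ∨ PySem.Chars.startswith stripped "DESCRIPTION".toList ∨
          PySem.Chars.startswith stripped "DEFAULT_PARAMS".toList) ∧ leading ≤ funcIndent then
        line :: pvALoop PvSkip.noskip braceDepth funcIndent rest
      else
        pvALoop PvSkip.function braceDepth funcIndent rest
    else if PySem.Chars.startswith stripped "PARAM_GRID".toList then
      if PySem.Chars.isIn ['{'] stripped then
        let d := pvBraceDelta stripped
        if d > 0 then pvALoop PvSkip.braces d funcIndent rest
        else pvALoop PvSkip.noskip d funcIndent rest
      else
        pvALoop PvSkip.noskip braceDepth funcIndent rest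
    else if PySem.Chars.startswith stripped "def generate_signals_matrix".toList then
      pvALoop PvSkip.function braceDepth leading rest
    else
      line :: pvALoop PvSkip.noskip braceDepth funcIndent rest

def strip_advanced_functions_py (source : String) : String :=
  String.ofList (PySem.Chars.strip (PySem.Chars.join ['\n'] (pvALoop PvSkip.noskip 0 0 (PySem.Chars.splitOn source.toList ['\n']))))

-- ===== PORT B =====
-- inner loop 1 of Source B: consume lines while brace depth stays positive, return the rest
def pvSkipBraces (depth : Int) : List (List Char) → List (List Char)
  | [] => []
  | l :: rest =>
    if depth ≤ 0 then l :: rest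
    else
      let s := PySem.Chars.strip l
      if s = [] then pvSkipBraces depth rest
      else pvSkipBraces (depth + pvBraceDelta s) rest

-- inner loop 2 of Source B: consume the function body, emitting the sentinel line; return (emitted, rest)
def pvSkipFunc (funcIndent : Int) : List (List Char) → List (List Char) × List (List Char)
  | [] => ([], [])
  | nxt :: rest =>
    let s := PySem.Chars.strip nxt
    if s ≠ [] ∧ (PySem.Chars.startswith s "def ".toList ∨ PySem.Chars.startswith s "class ".toList ∨
        PySem.Chars.startswith s "PARAM_GRID".toList ∨ PySem.Chars.startswith s "DESCRIPTION".toList ∨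
        PySem.Chars.startswith s "DEFAULT_PARAMS".toList) ∧ pvLeading nxt ≤ funcIndent then
      ([nxt], rest)
    else
      pvSkipFunc funcIndent rest

theorem pvSkipBraces_length_le (d : Int) (xs : List (List Char)) :
    (pvSkipBraces d xs).length ≤ xs.length := by
  induction xs generalizing d with
  | nil => simp [pvSkipBraces]
  | cons l rest ih =>
    simp only [pvSkipBraces]
    split_ifs with h1 h2
    · simp
    · exact le_trans (ih _) (Nat.le_succ _)
    · exact le_trans (ih _) (Nat.le_succ _)

theorem pvSkipFunc_length_le (fi : Int) (xs : List (List Char)) :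
    (pvSkipFunc fi xs).2.length ≤ xs.length := by
  induction xs generalizing fi with
  | nil => simp [pvSkipFunc]
  | cons l rest ih =>
    simp only [pvSkipFunc]
    split_ifs with h1
    · exact Nat.le_succ _
    · exact le_trans (ih _) (Nat.le_succ _)

-- outer while loop of Source B
def pvBOuter : List (List Char) → List (List Char)
  | [] => []
  | line :: rest =>
    let stripped := PySem.Chars.strip line
    if PySem.Chars.startswith stripped "PARAM_GRID".toList then
      if PySem.Chars.isIn ['{'] stripped then
        pvBOuter (pvSkipBraces (pvBraceDelta stripped) rest)
      else
        pvBOuter rest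
    else if PySem.Chars.startswith stripped "def generate_signals_matrix".toList then
      let p := pvSkipFunc (pvLeading line) rest
      p.1 ++ pvBOuter p.2
    else
      line :: pvBOuter rest
termination_by lines => lines.length
decreasing_by
  · exact Nat.lt_succ_of_le (pvSkipBraces_length_le _ _)
  · simp
  · exact Nat.lt_succ_of_le (pvSkipFunc_length_le _ _)
  · simp

def strip_advanced_functions_py_alt (source : String) : String :=
  String.ofList (PySem.Chars.strip (PySem.Chars.join ['\n'] (pvBOuter (PySem.Chars.splitOn source.toList ['\n']))))

-- ===== PRECONDITION & SPEC =====
def Spec_strip_advanced_functions_py (source : String) (out : String) : Prop := out = strip_advanced_functions_py_alt source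
instance (source : String) (out : String) : Decidable (Spec_strip_advanced_functions_py source out) := by unfold Spec_strip_advanced_functions_py; infer_instance

-- ===== CLAIM (what is proved, stated in full; the proofs are below) =====
def Claim_equal_strip_advanced_functions_py : Prop := ∀ (source : String), Dom_strip_advanced_functions_py source → Spec_strip_advanced_functions_py source (strip_advanced_functions_py source)

-- ===== LEMMAS AND PROOFS =====

theorem pvSkipBraces_of_nonpos (d : Int) (xs : List (List Char)) (h : d ≤ 0) :
    pvSkipBraces d xs = xs := by
  cases xs <;> simp [pvSkipBraces, h]

-- the three loop states of A against the three loops of B, in one induction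
theorem pv_main (lines : List (List Char)) :
    (∀ d fi, pvALoop PvSkip.noskip d fi lines = pvBOuter lines) ∧
    (∀ d fi, 0 < d → pvALoop PvSkip.braces d fi lines = pvBOuter (pvSkipBraces d lines)) ∧
    (∀ d fi, pvALoop PvSkip.function d fi lines =
      (pvSkipFunc fi lines).1 ++ pvBOuter (pvSkipFunc fi lines).2) := by
  induction lines with
  | nil => simp [pvALoop, pvBOuter, pvSkipBraces, pvSkipFunc]
  | cons line rest ih =>
    obtain ⟨ihn, ihb, ihf⟩ := ih
    refine ⟨?_, ?_, ?_⟩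
    · intro d fi
      simp only [pvALoop, pvBOuter]
      rw [if_neg (by simp), if_neg (by simp), if_neg (by simp)]
      by_cases hpg : PySem.Chars.startswith (PySem.Chars.strip line) "PARAM_GRID".toList = true
      · rw [if_pos hpg, if_pos hpg]
        by_cases hin : PySem.Chars.isIn ['{'] (PySem.Chars.strip line) = true
        · rw [if_pos hin, if_pos hin]
          by_cases hd0 : pvBraceDelta (PySem.Chars.strip line) > 0
          · rw [if_pos hd0]; exact ihb _ _ hd0
          · rw [if_neg hd0, pvSkipBraces_of_nonpos _ _ (by omega)]; exact ihn _ _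
        · rw [if_neg hin, if_neg hin]; exact ihn _ _
      · rw [if_neg hpg, if_neg hpg]
        by_cases hdf : PySem.Chars.startswith (PySem.Chars.strip line) "def generate_signals_matrix".toList = true
        · rw [if_pos hdf, if_pos hdf]; exact ihf _ _
        · rw [if_neg hdf, if_neg hdf, ihn d fi]
    · intro d fi hd
      simp only [pvALoop, pvSkipBraces, if_neg (by omega : ¬ d ≤ 0)]
      by_cases hb : PySem.Chars.strip line = []
      · rw [if_pos ⟨hb, by simp⟩, if_pos hb]
        exact ihb _ _ hd
      · rw [if_neg (by simp [hb]), if_pos (by trivial), if_neg hb]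
        by_cases hz : d + pvBraceDelta (PySem.Chars.strip line) ≤ 0
        · rw [if_pos hz, pvSkipBraces_of_nonpos _ _ hz]; exact ihn _ _
        · rw [if_neg hz]; exact ihb _ _ (by omega)
    · intro d fi
      simp only [pvALoop, pvSkipFunc]
      by_cases hb : PySem.Chars.strip line = []
      · rw [if_pos ⟨hb, by simp⟩, if_neg (by simp [hb])]
        exact ihf _ _
      · rw [if_neg (by simp [hb]), if_neg (by simp), if_pos (by trivial)]
        by_cases hs : (PySem.Chars.startswith (PySem.Chars.strip line) "def ".toList = true ∨
            PySem.Chars.startswith (PySem.Chars.strip line) "class ".toList = true ∨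
            PySem.Chars.startswith (PySem.Chars.strip line) "PARAM_GRID".toList = true ∨
            PySem.Chars.startswith (PySem.Chars.strip line) "DESCRIPTION".toList = true ∨
            PySem.Chars.startswith (PySem.Chars.strip line) "DEFAULT_PARAMS".toList = true) ∧
            pvLeading line ≤ fi
        · rw [if_pos hs, if_pos ⟨hb, hs⟩]
          simp only [List.cons_append, List.nil_append]
          rw [ihn d fi]
        · rw [if_neg hs, if_neg (by intro h; exact hs ⟨h.2.1, h.2.2⟩)]
          exact ihf _ _

-- ===== VERDICT (by name: the statement is the Claim_ definition above) =====
theorem strip_advanced_functions_py_spec : Claim_equal_strip_advanced_functions_py := by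
  intro source _
  unfold Spec_strip_advanced_functions_py strip_advanced_functions_py strip_advanced_functions_py_alt
  rw [(pv_main _).1 0 0]
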